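-- pv_equiv track=rewrite | github.com/Suuuuuuuus/LCWGS_pipeline | scripts/lcSV/lcSV.py | calculate_score_per_alignment
-- ===== SOURCE A (Python) =====
-- def calculate_score_per_alignment(cigars, cg = -6, cm = 0, cx = -4, ce = -2):
--     score = 0
--
--     for i, c in enumerate(cigars):
--         code, l = c
--         if code == 1 or code == 2 or code == 4:
--             score += ce*l
--             score += cg
--         elif code == 8:
--             score += cx*l
--         else:
--             pass
--     return score
-- ===== SOURCE B (Python) =====
-- def calculate_score_per_alignment(cigars, cg = -6, cm = 0, cx = -4, ce = -2):
--     # One branch-free pass: group total length and op count per cigar code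
--     # into dicts, then combine the relevant groups with a closed formula.
--     total_len = {}
--     op_count = {}
--     for code, l in cigars:
--         total_len[code] = total_len.get(code, 0) + l
--         op_count[code] = op_count.get(code, 0) + 1
--     gap_len = total_len.get(1, 0) + total_len.get(2, 0) + total_len.get(4, 0)
--     gap_n = op_count.get(1, 0) + op_count.get(2, 0) + op_count.get(4, 0)
--     return ce * gap_len + cg * gap_n + cx * total_len.get(8, 0)
-- ===== Notes on version B (the rewrite author's own statement) =====
-- stated objective: alternative
-- what changed: B replaces A's fused branch-by-branch accumulator loop with a branch-free grouping pass that builds two dicts (total length and op count per cigar code) and then combines the code-1/2/4 and code-8 groups in one closed arithmetic formula; the per-code conditionals disappear from the traversal.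
import Mathlib
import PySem

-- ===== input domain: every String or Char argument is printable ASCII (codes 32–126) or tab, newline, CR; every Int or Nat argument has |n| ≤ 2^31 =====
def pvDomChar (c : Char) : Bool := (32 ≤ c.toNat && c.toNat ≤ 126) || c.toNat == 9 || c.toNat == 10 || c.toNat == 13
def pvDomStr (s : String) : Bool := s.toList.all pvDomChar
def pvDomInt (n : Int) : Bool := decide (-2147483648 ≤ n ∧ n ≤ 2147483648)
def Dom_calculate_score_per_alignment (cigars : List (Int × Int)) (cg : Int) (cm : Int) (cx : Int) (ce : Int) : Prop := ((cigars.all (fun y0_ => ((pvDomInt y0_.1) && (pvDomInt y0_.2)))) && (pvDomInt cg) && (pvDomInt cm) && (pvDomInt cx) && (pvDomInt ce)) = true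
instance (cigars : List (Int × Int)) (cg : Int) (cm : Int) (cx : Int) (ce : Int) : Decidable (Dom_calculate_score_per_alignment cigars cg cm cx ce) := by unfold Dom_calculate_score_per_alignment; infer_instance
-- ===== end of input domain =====

-- B replaces A's fused branch-by-branch accumulator loop with a branch-free grouping pass
-- (dicts of per-code total length and op count) followed by one closed arithmetic formula
-- (objective: alternative; same O(n) cost).
-- ===== PORT A =====
def calculate_score_per_alignment (cigars : List (Int × Int)) (cg : Int) (cm : Int) (cx : Int) (ce : Int) : Int :=
  (PySem.List.enumerate cigars).foldl (fun score ic =>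
    let code := ic.2.1
    let l := ic.2.2
    if code == 1 || code == 2 || code == 4 then
      score + ce * l + cg
    else if code == 8 then
      score + cx * l
    else
      score) 0

-- ===== PORT B =====
def calculate_score_per_alignment_alt (cigars : List (Int × Int)) (cg : Int) (cm : Int) (cx : Int) (ce : Int) : Int :=
  let st := cigars.foldl
    (fun (st : PySem.Dict Int Int × PySem.Dict Int Int) c =>
      (st.1.insert c.1 (st.1.getD c.1 0 + c.2),
       st.2.insert c.1 (st.2.getD c.1 0 + 1)))
    (PySem.Dict.empty, PySem.Dict.empty)
  let total_len := st.1
  let op_count := st.2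
  let gap_len := total_len.getD 1 0 + total_len.getD 2 0 + total_len.getD 4 0
  let gap_n := op_count.getD 1 0 + op_count.getD 2 0 + op_count.getD 4 0
  ce * gap_len + cg * gap_n + cx * total_len.getD 8 0

-- ===== PRECONDITION & SPEC =====
def Spec_calculate_score_per_alignment (cigars : List (Int × Int)) (cg : Int) (cm : Int) (cx : Int) (ce : Int) (out : Int) : Prop := out = calculate_score_per_alignment_alt cigars cg cm cx ce
instance (cigars : List (Int × Int)) (cg : Int) (cm : Int) (cx : Int) (ce : Int) (out : Int) : Decidable (Spec_calculate_score_per_alignment cigars cg cm cx ce out) := by unfold Spec_calculate_score_per_alignment; infer_instance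

-- ===== CLAIM (what is proved, stated in full; the proofs are below) =====
def Claim_equal_calculate_score_per_alignment : Prop := ∀ (cigars : List (Int × Int)) (cg : Int) (cm : Int) (cx : Int) (ce : Int), Dom_calculate_score_per_alignment cigars cg cm cx ce → Spec_calculate_score_per_alignment cigars cg cm cx ce (calculate_score_per_alignment cigars cg cm cx ce)

-- ===== LEMMAS AND PROOFS =====

-- per-code filtered aggregates of the cigar list
def csaSumLen (cigars : List (Int × Int)) (k : Int) : Int :=
  ((cigars.filter (fun c => c.1 == k)).map (fun c => c.2)).sum

def csaCount (cigars : List (Int × Int)) (k : Int) : Int :=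
  ((cigars.filter (fun c => c.1 == k)).length : Int)

-- B's dict-building fold, read back at any key, is the filtered aggregate.
theorem csa_fold_dicts (cigars : List (Int × Int))
    (d1 d2 : PySem.Dict Int Int) (k : Int) :
    (cigars.foldl
      (fun (st : PySem.Dict Int Int × PySem.Dict Int Int) c =>
        (st.1.insert c.1 (st.1.getD c.1 0 + c.2),
         st.2.insert c.1 (st.2.getD c.1 0 + 1))) (d1, d2)).1.getD k 0
      = d1.getD k 0 + csaSumLen cigars k
    ∧ (cigars.foldl
      (fun (st : PySem.Dict Int Int × PySem.Dict Int Int) c =>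
        (st.1.insert c.1 (st.1.getD c.1 0 + c.2),
         st.2.insert c.1 (st.2.getD c.1 0 + 1))) (d1, d2)).2.getD k 0
      = d2.getD k 0 + csaCount cigars k := by
  induction cigars generalizing d1 d2 with
  | nil => simp [csaSumLen, csaCount]
  | cons c rest ih =>
    obtain ⟨code, l⟩ := c
    simp only [List.foldl_cons]
    refine ⟨?_, ?_⟩ <;>
    · rcases ih (d1.insert code (d1.getD code 0 + l))
        (d2.insert code (d2.getD code 0 + 1)) with ⟨h1, h2⟩
      first
        | rw [h1]
        | rw [h2]
      simp only [csaSumLen, csaCount, List.filter_cons, PySem.Dict.getD_insert]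
      by_cases hk : k = code
      · subst hk
        simp
        ring
      · have hk' : code ≠ k := fun h => hk h.symm
        simp [hk, hk']

-- A's running-sum fold, started at s, in closed form over the aggregates.
theorem csa_foldA_closed (cigars : List (Int × Int)) (cg cx ce : Int) (s i : Int) :
    (PySem.List.enumerate cigars i).foldl (fun score ic =>
      let code := ic.2.1
      let l := ic.2.2
      if code == 1 || code == 2 || code == 4 then score + ce * l + cg
      else if code == 8 then score + cx * l
      else score) s
    = s + ce * (csaSumLen cigars 1 + csaSumLen cigars 2 + csaSumLen cigars 4)
        + cg * (csaCount cigars 1 + csaCount cigars 2 + csaCount cigars 4)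
        + cx * csaSumLen cigars 8 := by
  induction cigars generalizing s i with
  | nil => simp [csaSumLen, csaCount]
  | cons c rest ih =>
    obtain ⟨code, l⟩ := c
    simp only [PySem.List.enumerate_cons, List.foldl_cons]
    rw [ih]
    simp only [csaSumLen, csaCount, List.filter_cons]
    by_cases e1 : code = 1 <;> by_cases e2 : code = 2 <;>
      by_cases e4 : code = 4 <;> by_cases e8 : code = 8 <;>
      simp_all <;> ring

-- ===== VERDICT (by name: the statement is the Claim_ definition above) =====
theorem calculate_score_per_alignment_spec : Claim_equal_calculate_score_per_alignment := by
  intro cigars cg cm cx ce _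
  unfold Spec_calculate_score_per_alignment calculate_score_per_alignment
    calculate_score_per_alignment_alt
  rw [show PySem.List.enumerate cigars = PySem.List.enumerate cigars 0 from rfl,
    csa_foldA_closed]
  simp only []
  rw [(csa_fold_dicts cigars _ _ 1).1, (csa_fold_dicts cigars _ _ 2).1,
    (csa_fold_dicts cigars _ _ 4).1, (csa_fold_dicts cigars _ _ 8).1,
    (csa_fold_dicts cigars _ _ 1).2, (csa_fold_dicts cigars _ _ 2).2,
    (csa_fold_dicts cigars _ _ 4).2]
  simp only [PySem.Dict.getD_empty]
  ring
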